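-- pv_equiv track=rewrite | github.com/Jickey0/Nand2tetris | projects/10/parser.py | advance
-- ===== SOURCE A (Python) =====
-- symbol = ['{', '}', '(', ')', '[', ']', '.', ',', ';', '+', '-', '*', '/', '&', '|', '<', '>', '=', '~']
--
-- def advance(str):
--     token = ''
--     for i in range(len(str)):
--         if str[i] not in symbol:
--             token = token + str[i]
--         else:
--             if len(token) == 0: # we immediately have a symbol
--                 return (str[i], str[i + 1:])
--             else: # encounter a symbol but already have a token
--                 return (token, str[i:])
--
--     return (token, '') # reach the end of the str
-- ===== SOURCE B (Python) =====
-- symbol = ['{', '}', '(', ')', '[', ']', '.', ',', ';', '+', '-', '*', '/', '&', '|', '<', '>', '=', '~']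
--
-- def advance(str):
--     # boundary-find-then-slice: i = index of the first symbol character, then slice
--     hits = [str.index(s) for s in symbol if s in str]
--     if not hits:
--         return (str, '')
--     i = min(hits)
--     if i == 0:
--         return (str[0], str[1:])
--     return (str[:i], str[i:])
-- ===== Notes on version B (the rewrite author's own statement) =====
-- stated objective: simpler
-- what changed: Replaces A's char-by-char accumulation loop with a boundary-find-then-slice decomposition: compute the index of the first symbol character as min(str.index(s) for symbols present), then return the answer by slicing.
import Mathlib
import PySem

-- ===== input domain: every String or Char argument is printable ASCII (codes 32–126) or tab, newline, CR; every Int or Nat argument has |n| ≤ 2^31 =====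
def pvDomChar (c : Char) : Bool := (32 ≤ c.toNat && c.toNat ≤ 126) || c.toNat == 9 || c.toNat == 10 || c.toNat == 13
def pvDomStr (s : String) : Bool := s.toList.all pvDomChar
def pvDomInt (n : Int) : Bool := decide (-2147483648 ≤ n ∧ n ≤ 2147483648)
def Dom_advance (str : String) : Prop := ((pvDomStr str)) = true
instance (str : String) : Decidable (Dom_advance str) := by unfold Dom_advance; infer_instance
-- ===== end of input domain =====

-- B replaces A's char-by-char token-accumulation loop with a boundary-find-then-slice
-- decomposition (min over first indexes of each symbol, then slicing); objective: simpler.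

-- the module-level 'symbol' list
def pvSymbols : List Char :=
  ['{', '}', '(', ')', '[', ']', '.', ',', ';', '+', '-', '*', '/', '&', '|', '<', '>', '=', '~']

-- ===== PORT A =====
-- A's for-loop over str, as structural recursion over the remaining characters;
-- at position i the remaining suffix c :: rest is str[i:] and rest is str[i+1:].
def advanceGoA (token : List Char) : List Char → String × String
  | [] => (String.ofList token, "")
  | c :: rest =>
    if c ∉ pvSymbols then advanceGoA (token ++ [c]) rest
    else if token.length = 0 then (String.ofList [c], String.ofList rest)
    else (String.ofList token, String.ofList (c :: rest))

def advance (str : String) : String × String := advanceGoA [] str.toList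

-- ===== PORT B =====
-- hits = [str.index(s) for s in symbol if s in str]; i = min(hits); then slice.
-- str.index(s) for a one-character s is the index of that character (PySem.List.index?);
-- the slices str[:i], str[i:], str[0], str[1:] have nonnegative in-range bounds, so they
-- are exactly take/drop.
def advance_alt (str : String) : String × String :=
  match PySem.List.min? (pvSymbols.filterMap (fun s => PySem.List.index? str.toList s))
      (fun x => x) with
  | none => (str, "")
  | some i =>
    if i = 0 then (String.ofList (str.toList.take 1), String.ofList (str.toList.drop 1))
    else (String.ofList (str.toList.take i), String.ofList (str.toList.drop i))

-- ===== PRECONDITION & SPEC =====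
def Spec_advance (str : String) (out : String × String) : Prop := out = advance_alt str
instance (str : String) (out : String × String) : Decidable (Spec_advance str out) := by unfold Spec_advance; infer_instance

-- ===== CLAIM (what is proved, stated in full; the proofs are below) =====
def Claim_equal_advance : Prop := ∀ (str : String), Dom_advance str → Spec_advance str (advance str)

-- ===== LEMMAS AND PROOFS =====

-- min commutes with (+1) through foldl
theorem foldl_min_map_succ (x : Nat) (t : List Nat) :
    List.foldl min (x + 1) (t.map (· + 1)) = List.foldl min x t + 1 := by
  induction t generalizing x with
  | nil => rfl
  | cons y t ih =>
    simp only [List.map_cons, List.foldl_cons]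
    rw [show min (x + 1) (y + 1) = min x y + 1 by omega, ih]

theorem min?_id_map_succ (xs : List Nat) :
    PySem.List.min? (xs.map (· + 1)) (fun x => x) =
      (PySem.List.min? xs (fun x => x)).map (· + 1) := by
  cases xs with
  | nil => rfl
  | cons x t =>
    rw [List.map_cons, PySem.List.min?_id_cons, PySem.List.min?_id_cons]
    simp [foldl_min_map_succ]

-- B's min-of-hits IS the index of the first character belonging to S
theorem min_hits_eq_findIdx? (S : List Char) (cs : List Char) :
    PySem.List.min? (S.filterMap (fun s => PySem.List.index? cs s)) (fun x => x) =
      cs.findIdx? (fun c => decide (c ∈ S)) := by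
  induction cs with
  | nil =>
    simp [PySem.List.index?_eq_idxOf?, List.idxOf?, PySem.List.min?]
  | cons c rest ih =>
    rw [List.findIdx?_cons]
    by_cases hc : c ∈ S
    · simp only [hc, decide_true, if_true]
      have h0 : (0 : Nat) ∈ S.filterMap (fun s => PySem.List.index? (c :: rest) s) := by
        refine List.mem_filterMap.mpr ⟨c, hc, ?_⟩
        exact PySem.List.index?_cons_self _ _
      cases hne : PySem.List.min? (S.filterMap (fun s => PySem.List.index? (c :: rest) s)) (fun x => x) with
      | none =>
        exact absurd (List.eq_nil_iff_forall_not_mem.mp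
          ((PySem.List.min?_eq_none_iff _ _).mp hne) 0 h0) (by simp)
      | some m =>
        have := PySem.List.min?_isMin hne 0 h0
        simp only [Option.some.injEq]
        omega
    · rw [if_neg (by simp [hc])]
      have hcongr : S.filterMap (fun s => PySem.List.index? (c :: rest) s) =
          S.filterMap (fun s => (PySem.List.index? rest s).map (· + 1)) := by
        apply List.filterMap_congr
        intro s hs
        exact PySem.List.index?_cons_of_ne rest (fun h => hc (h ▸ hs))
      rw [hcongr, ← List.map_filterMap, min?_id_map_succ, ih]

-- A's accumulator loop, characterised by the first symbol index in the remaining chars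
theorem advanceGoA_spec (cs : List Char) (token : List Char) :
    advanceGoA token cs =
      match cs.findIdx? (fun c => decide (c ∈ pvSymbols)) with
      | none => (String.ofList (token ++ cs), "")
      | some i =>
        if token.length + i = 0 then (String.ofList (cs.take 1), String.ofList (cs.drop 1))
        else (String.ofList (token ++ cs.take i), String.ofList (cs.drop i)) := by
  induction cs generalizing token with
  | nil => simp [advanceGoA]
  | cons c rest ih =>
    rw [List.findIdx?_cons]
    by_cases hc : c ∈ pvSymbols
    · simp only [hc, decide_true, if_true, advanceGoA, not_true, if_false]
      by_cases ht : token.length = 0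
      · have : token = [] := List.length_eq_zero_iff.mp ht
        subst this
        simp
      · simp [ht]
    · simp only [hc, decide_false, advanceGoA, not_false_iff, if_true]
      rw [ih]
      cases h : rest.findIdx? (fun c => decide (c ∈ pvSymbols)) with
      | none => simp
      | some j =>
        simp only [Option.map_some]
        have h1 : (token ++ [c]).length + j ≠ 0 := by simp
        have h2 : token.length + (j + 1) ≠ 0 := by omega
        simp only [h1, if_false]
        simp [List.take_succ_cons, List.drop_succ_cons]

-- ===== VERDICT (by name: the statement is the Claim_ definition above) =====
theorem advance_spec : Claim_equal_advance := by
  intro str _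
  show advance str = advance_alt str
  unfold advance advance_alt
  rw [advanceGoA_spec, min_hits_eq_findIdx?]
  cases h : str.toList.findIdx? (fun c => decide (c ∈ pvSymbols)) with
  | none => simp [String.ofList_toList]
  | some i => simp
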